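-- pv_equiv track=rewrite | github.com/GoodbyePlanet/advent_of_code_2023 | day_05/second/main.py | process_maps
-- ===== SOURCE A (Python) =====
-- def process_maps(list_of_maps):
--     maps_nums = []
--     curr_sublist = []
--
--     for item in list_of_maps:
--         if item != "":
--             curr_sublist.append([item])
--         elif curr_sublist:
--             maps_nums.append(curr_sublist)
--             curr_sublist = []
--
--     if curr_sublist:
--         maps_nums.append(curr_sublist)
--
--     maps = [el[1:] for el in maps_nums]
--
--     return maps
-- ===== SOURCE B (Python) =====
-- def process_maps(list_of_maps):
--     # Run-scanner: skip empty strings, then consume one maximal non-empty run,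
--     # wrapping each item after the run's header; no accumulator/flush state.
--     xs = list_of_maps
--     n = len(xs)
--     result = []
--     i = 0
--     while i < n:
--         if xs[i] == "":
--             i += 1
--             continue
--         # xs[i] is the run's header: dropped
--         j = i + 1
--         run = []
--         while j < n and xs[j] != "":
--             run.append([xs[j]])
--             j += 1
--         result.append(run)
--         i = j
--     return result
-- ===== Notes on version B (the rewrite author's own statement) =====
-- stated objective: alternative
-- what changed: Replaces A's accumulator/flush state machine (build wrapped groups, end-of-loop flush, then a second pass slicing off each group's header) with a single run-scanner that skips empty strings and consumes each maximal non-empty run directly, dropping the header as it goes, so no partial-group state, no final flush and no second slicing pass exist.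
import Mathlib
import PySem

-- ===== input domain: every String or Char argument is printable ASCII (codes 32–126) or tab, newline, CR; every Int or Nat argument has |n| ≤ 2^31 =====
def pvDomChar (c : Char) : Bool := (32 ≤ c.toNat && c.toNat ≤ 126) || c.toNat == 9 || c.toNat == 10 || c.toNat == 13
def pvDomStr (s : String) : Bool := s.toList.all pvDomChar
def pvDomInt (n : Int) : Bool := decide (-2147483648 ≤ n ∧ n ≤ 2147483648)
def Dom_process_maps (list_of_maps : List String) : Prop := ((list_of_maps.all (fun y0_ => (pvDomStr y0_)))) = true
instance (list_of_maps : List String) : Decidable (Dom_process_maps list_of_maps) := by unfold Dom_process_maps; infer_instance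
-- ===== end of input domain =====

-- B replaces A's accumulator/flush state machine by a direct run-scanner (alternative decomposition, same cost).

-- ===== PORT A =====
-- loop body of A: state = (maps_nums, curr_sublist)
def pvStepA (st : List (List (List String)) × List (List String)) (item : String) :
    List (List (List String)) × List (List String) :=
  if item ≠ "" then (st.1, st.2 ++ [[item]])
  else if st.2 ≠ [] then (st.1 ++ [st.2], [])
  else st

def process_maps (list_of_maps : List String) : List (List (List String)) :=
  let st := list_of_maps.foldl pvStepA ([], [])
  let maps_nums := if st.2 ≠ [] then st.1 ++ [st.2] else st.1
  maps_nums.map (fun el => el.drop 1)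

-- ===== PORT B =====
-- inner while loop of B: collect the wrapped run items, return (run, remaining suffix)
def pvCollectRun : List String → List (List String) × List String
  | [] => ([], [])
  | x :: xs =>
      if x = "" then ([], x :: xs)
      else
        let r := pvCollectRun xs
        ([x] :: r.1, r.2)

theorem pvCollectRun_snd_length (l : List String) : (pvCollectRun l).2.length ≤ l.length := by
  induction l with
  | nil => simp [pvCollectRun]
  | cons x xs ih =>
      by_cases h : x = "" <;> simp [pvCollectRun, h] <;> omega

def process_maps_alt (list_of_maps : List String) : List (List (List String)) :=
  match h : list_of_maps with
  | [] => []
  | x :: xs =>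
      if x = "" then process_maps_alt xs
      else
        let r := pvCollectRun xs
        r.1 :: process_maps_alt r.2
termination_by list_of_maps.length
decreasing_by
  · simp
  · have := pvCollectRun_snd_length xs; simp; omega

-- ===== PRECONDITION & SPEC =====
def Spec_process_maps (list_of_maps : List String) (out : List (List (List String))) : Prop := out = process_maps_alt list_of_maps
instance (list_of_maps : List String) (out : List (List (List String))) : Decidable (Spec_process_maps list_of_maps out) := by unfold Spec_process_maps; infer_instance

-- ===== CLAIM (what is proved, stated in full; the proofs are below) =====
def Claim_equal_process_maps : Prop := ∀ (list_of_maps : List String), Dom_process_maps list_of_maps → Spec_process_maps list_of_maps (process_maps list_of_maps)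

-- ===== LEMMAS AND PROOFS =====

-- continuation semantics of A's remaining loop, given the pending curr_sublist
def pvCont (curr : List (List String)) : List String → List (List (List String))
  | [] => if curr = [] then [] else [curr.drop 1]
  | x :: xs =>
      if x = "" then
        if curr = [] then pvCont [] xs else curr.drop 1 :: pvCont [] xs
      else pvCont (curr ++ [[x]]) xs

theorem pvCont_eq_alt (l : List String) :
    ∀ curr, pvCont curr l =
      if curr = [] then process_maps_alt l
      else (curr.drop 1 ++ (pvCollectRun l).1) :: process_maps_alt (pvCollectRun l).2 := by
  induction l with
  | nil =>
      intro curr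
      by_cases h : curr = [] <;> simp [pvCont, process_maps_alt, pvCollectRun, h]
  | cons x xs ih =>
      intro curr
      by_cases hx : x = ""
      · by_cases h : curr = [] <;>
          simp [pvCont, process_maps_alt, pvCollectRun, hx, h, ih]
      · have key := ih (curr ++ [[x]])
        by_cases h : curr = []
        · subst h
          simp only [List.nil_append] at key
          simp at key
          simp [pvCont, process_maps_alt, pvCollectRun, hx, key]
        · have hdrop : (curr ++ [[x]]).drop 1 = curr.drop 1 ++ [[x]] := by
            cases curr with
            | nil => exact absurd rfl h
            | cons a as => simp
          simp [hdrop] at key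
          simp [pvCont, process_maps_alt, pvCollectRun, hx, h, key]

theorem pvFold_eq_cont (l : List String) :
    ∀ maps curr,
      (List.map (fun el => List.drop 1 el)
        (if (l.foldl pvStepA (maps, curr)).2 ≠ [] then
            (l.foldl pvStepA (maps, curr)).1 ++ [(l.foldl pvStepA (maps, curr)).2]
         else (l.foldl pvStepA (maps, curr)).1)) =
      maps.map (fun el => List.drop 1 el) ++ pvCont curr l := by
  induction l with
  | nil =>
      intro maps curr
      by_cases h : curr = [] <;> simp [pvCont, h]
  | cons x xs ih =>
      intro maps curr
      by_cases hx : x = ""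
      · by_cases h : curr = []
        · have hs : pvStepA (maps, curr) x = (maps, curr) := by simp [pvStepA, hx, h]
          rw [List.foldl_cons, hs, ih]
          simp [pvCont, hx, h]
        · have hs : pvStepA (maps, curr) x = (maps ++ [curr], []) := by simp [pvStepA, hx, h]
          rw [List.foldl_cons, hs, ih]
          simp [pvCont, hx, h]
      · have hs : pvStepA (maps, curr) x = (maps, curr ++ [[x]]) := by simp [pvStepA, hx]
        rw [List.foldl_cons, hs, ih]
        simp [pvCont, hx]

-- ===== VERDICT (by name: the statement is the Claim_ definition above) =====
theorem process_maps_spec : Claim_equal_process_maps := by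
  intro l _
  unfold Spec_process_maps process_maps
  show (List.map (fun el => List.drop 1 el)
      (if (l.foldl pvStepA ([], [])).2 ≠ [] then
          (l.foldl pvStepA ([], [])).1 ++ [(l.foldl pvStepA ([], [])).2]
       else (l.foldl pvStepA ([], [])).1)) = process_maps_alt l
  rw [pvFold_eq_cont l [] [], pvCont_eq_alt l []]
  simp
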